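-- pv_equiv track=rewrite | github.com/deha24/optymalizacja_kombinatoryczna1 | simulatedAnnealing.py | convert_to_graph6
-- ===== SOURCE A (Python) =====
-- def convert_to_graph6(matrix):
--
--     bits = []
--
--     for i in range(1, len(matrix)):
--         for j in range(i):
--             bits.append(str(matrix[i][j]))
--
--     bits_join= "".join(bits)
--
--     while (len(bits_join))%6 !=0:
--         bits_join += "0"
--
--     graph6 = chr(len(matrix)+63)
--
--     for i in range(0, len(bits_join),6):
--         package = bits_join[i : i+6]
--         value = int(package,2)
--         graph6 += chr(value+63)
--
--     return graph6
-- ===== SOURCE B (Python) =====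
-- def convert_to_graph6(matrix):
--     # One fused pass over the lower-triangle entries with an arithmetic
--     # accumulator: no bit-string is built, no int(s, 2) parsing, no padding pass.
--     n = len(matrix)
--     out = [chr(n + 63)]
--     acc = 0
--     cnt = 0
--     for i in range(1, n):
--         for j in range(i):
--             acc = acc * 2 + matrix[i][j]
--             cnt += 1
--             if cnt == 6:
--                 out.append(chr(acc + 63))
--                 acc = 0
--                 cnt = 0
--     if cnt:
--         out.append(chr((acc << (6 - cnt)) + 63))
--     return "".join(out)
-- ===== Notes on version B (the rewrite author's own statement) =====
-- stated objective: simpler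
-- what changed: Replaces A's three passes (collect per-entry str() bits into a list, while-loop pad the joined bit string, re-scan it in 6-char slices parsed with int(.,2)) by one fused pass over the lower-triangle entries that keeps an arithmetic accumulator and a bit count, emitting chr(acc+63) every 6 bits and one final padded character.
-- outside the precondition, e.g. on convert_to_graph6([[0, 0], [10, 0]]): A returns 'A_', B returns 'Aſ'
import Mathlib
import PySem

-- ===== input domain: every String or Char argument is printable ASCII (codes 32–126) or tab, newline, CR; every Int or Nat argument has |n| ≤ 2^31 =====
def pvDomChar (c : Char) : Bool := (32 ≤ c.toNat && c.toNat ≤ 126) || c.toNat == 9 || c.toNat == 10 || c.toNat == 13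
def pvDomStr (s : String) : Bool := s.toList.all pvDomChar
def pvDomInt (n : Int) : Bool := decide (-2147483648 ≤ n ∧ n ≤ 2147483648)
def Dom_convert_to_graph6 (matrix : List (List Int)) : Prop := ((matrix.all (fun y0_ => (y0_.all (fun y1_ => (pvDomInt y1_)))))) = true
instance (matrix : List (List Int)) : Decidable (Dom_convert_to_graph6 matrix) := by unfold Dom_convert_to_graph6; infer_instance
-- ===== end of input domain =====

-- B fuses A's three passes (collect bit string, pad, re-parse 6-char slices) into one pass with an
-- arithmetic accumulator emitting a character every 6 bits; objective: simpler (no claim of speed).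


-- ===== PORT A =====
-- chr(v + 63); exact: on Pre_ inputs every code point produced is a valid (printable ASCII) one
def pvChr63 (v : Int) : Char := Char.ofNat (v + 63).toNat

-- int(s, 2), ported by hand; exact on non-empty strings of '0'/'1' digits, which is all A feeds it on Pre_ inputs
def pvParseBin2 (cs : List Char) : Int := cs.foldl (fun a c => 2 * a + (if c = '1' then 1 else 0)) 0

-- the while-padding loop of A, verbatim (append "0" until the length is a multiple of 6)
def pvPad6 (s : List Char) : List Char :=
  if s.length % 6 = 0 then s else pvPad6 (s ++ ['0'])
termination_by (6 - s.length % 6) % 6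
decreasing_by simp; omega

def convert_to_graph6 (matrix : List (List Int)) : String :=
  -- matrix[i][j]: indices are in range on Pre_ inputs, so pyGetD with a default is exact there
  let bits : List String := (PySem.List.pyRange 1 matrix.length 1).foldl (fun bits i =>
      (PySem.List.pyRange 0 i 1).foldl (fun bits j =>
        bits ++ [PySem.Int.toStr (PySem.List.pyGetD (PySem.List.pyGetD matrix i []) j 0)]) bits) []
  let bits_join : List Char := pvPad6 (PySem.Str.join "" bits).toList
  let graph6 : List Char := [pvChr63 (matrix.length : Int)]
  let graph6 := (PySem.List.pyRange 0 (bits_join.length : Int) 6).foldl (fun g i =>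
      let package := PySem.List.slice bits_join (some i) (some (i + 6))
      g ++ [pvChr63 (pvParseBin2 package)]) graph6
  String.ofList graph6

-- ===== PORT B =====
def convert_to_graph6_alt (matrix : List (List Int)) : String :=
  let n := matrix.length
  let st : List Char × Int × Int := ([pvChr63 (n : Int)], 0, 0)
  let st := (PySem.List.pyRange 1 n 1).foldl (fun st i =>
      (PySem.List.pyRange 0 i 1).foldl (fun st j =>
        let acc := st.2.1 * 2 + PySem.List.pyGetD (PySem.List.pyGetD matrix i []) j 0
        let cnt := st.2.2 + 1
        if cnt = 6 then (st.1 ++ [pvChr63 acc], (0 : Int), (0 : Int))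
        else (st.1, acc, cnt)) st) st
  if st.2.2 ≠ 0 then String.ofList (st.1 ++ [pvChr63 (st.2.1 * 2 ^ (6 - st.2.2).toNat)])
  else String.ofList st.1

-- ===== PRECONDITION & SPEC =====
-- Pre_ restricts to well-formed 0/1 adjacency matrices (row i has at least i entries and its first i
-- entries are 0 or 1): on other inputs A raises IndexError (short rows) or ValueError (int(...,2) on
-- non-binary digits), except for accidental entries whose decimal digits are all 0/1 (e.g. 10), which
-- A concatenates as several bits — a quirk of per-entry str() no caller of a graph6 encoder relies on.
def Pre_convert_to_graph6 (matrix : List (List Int)) : Prop :=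
  ∀ i, i < matrix.length → i ≤ (matrix.getD i []).length ∧
    ∀ j, j < i → (matrix.getD i []).getD j 0 = 0 ∨ (matrix.getD i []).getD j 0 = 1
instance (matrix : List (List Int)) : Decidable (Pre_convert_to_graph6 matrix) := by
  unfold Pre_convert_to_graph6; infer_instance
def pvWitness_convert_to_graph6 : List (List Int) := [[0], [1, 0]]

def Spec_convert_to_graph6 (matrix : List (List Int)) (out : String) : Prop := out = convert_to_graph6_alt matrix
instance (matrix : List (List Int)) (out : String) : Decidable (Spec_convert_to_graph6 matrix out) := by unfold Spec_convert_to_graph6; infer_instance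

-- ===== CLAIM (what is proved, stated in full; the proofs are below) =====
def Claim_equal_convert_to_graph6 : Prop := ∀ (matrix : List (List Int)), Dom_convert_to_graph6 matrix → Pre_convert_to_graph6 matrix → Spec_convert_to_graph6 matrix (convert_to_graph6 matrix)

-- ===== LEMMAS AND PROOFS =====

-- the flattened lower-triangle entry list both ports traverse
def pvEntry (matrix : List (List Int)) (i j : Int) : Int :=
  PySem.List.pyGetD (PySem.List.pyGetD matrix i []) j 0

def pvBits (matrix : List (List Int)) : List Int :=
  (PySem.List.pyRange 1 matrix.length 1).flatMap
    (fun i => (PySem.List.pyRange 0 i 1).map (fun j => pvEntry matrix i j))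

def pvBitChar (e : Int) : Char := if e = 1 then '1' else '0'

def pvStepB (st : List Char × Int × Int) (e : Int) : List Char × Int × Int :=
  let acc := st.2.1 * 2 + e
  let cnt := st.2.2 + 1
  if cnt = 6 then (st.1 ++ [pvChr63 acc], (0 : Int), (0 : Int)) else (st.1, acc, cnt)

def pvFin (st : List Char × Int × Int) : List Char :=
  if st.2.2 ≠ 0 then st.1 ++ [pvChr63 (st.2.1 * 2 ^ (6 - st.2.2).toNat)] else st.1

def pvEnc6 (s : List Char) : List Char :=
  if s.isEmpty then [] else pvChr63 (pvParseBin2 (s.take 6)) :: pvEnc6 (s.drop 6)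
termination_by s.length
decreasing_by cases s <;> simp_all

def pvIsBits (bs : List Int) : Prop := ∀ e ∈ bs, e = 0 ∨ e = 1

theorem pvPad6_eq_aux : ∀ (k : Nat) (s : List Char), (6 - s.length % 6) % 6 = k →
    pvPad6 s = s ++ List.replicate k '0' := by
  intro k
  induction k with
  | zero =>
    intro s h
    have h0 : s.length % 6 = 0 := by omega
    rw [pvPad6, if_pos h0]; simp
  | succ k ih =>
    intro s h
    have h0 : ¬ s.length % 6 = 0 := by omega
    rw [pvPad6, if_neg h0, ih (s ++ ['0']) (by simp; omega)]
    simp [List.replicate_succ]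

theorem pvPad6_eq (s : List Char) : pvPad6 s = s ++ List.replicate ((6 - s.length % 6) % 6) '0' :=
  pvPad6_eq_aux _ s rfl

theorem pvEnc6_aux : ∀ (M : Nat) (s : List Char), M = (s.length + 5) / 6 →
    (List.range M).map (fun k => pvChr63 (pvParseBin2 ((s.drop (6 * k)).take 6))) = pvEnc6 s := by
  intro M
  induction M with
  | zero =>
    intro s h
    have : s.length = 0 := by omega
    have hs : s = [] := List.eq_nil_of_length_eq_zero this
    subst hs
    rw [pvEnc6]; simp
  | succ M ih =>
    intro s h
    have hne : s ≠ [] := by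
      intro hs; subst hs; simp at h
    have h1 : 1 ≤ s.length := List.length_pos_iff.mpr hne
    rw [pvEnc6, if_neg (by simpa [List.isEmpty_iff] using hne)]
    rw [List.range_succ_eq_map, List.map_cons, List.map_map]
    rw [show (fun k => pvChr63 (pvParseBin2 ((s.drop (6*k)).take 6))) ∘ Nat.succ
          = (fun k => pvChr63 (pvParseBin2 (((s.drop 6).drop (6*k)).take 6))) from ?_]
    · rw [ih (s.drop 6) (by rw [List.length_drop]; omega)]
      norm_num
    · funext k
      simp only [Function.comp_apply, List.drop_drop]
      rw [show 6 * Nat.succ k = 6 + 6 * k from by omega]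

theorem pvChunkFold (s g0 : List Char) :
    (PySem.List.pyRange 0 (s.length : Int) 6).foldl (fun g i =>
      g ++ [pvChr63 (pvParseBin2 (PySem.List.slice s (some i) (some (i + 6))))]) g0
    = g0 ++ pvEnc6 s := by
  rw [PySem.List.pyRange_of_pos _ _ (by norm_num : (0:Int) < 6)]
  rw [List.foldl_map, PySem.List.foldl_append_singleton_eq_map]
  congr 1
  have hN : (if (0:Int) < (s.length : Int) then (((s.length : Int) - 0 + 6 - 1) / 6).toNat else 0)
      = (s.length + 5) / 6 := by
    split
    · rw [show ((s.length : Int) - 0 + 6 - 1) = ((s.length + 5 : Nat) : Int) from by push_cast; ring,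
        show ((6:Int)) = ((6:Nat):Int) from by norm_num, ← Int.natCast_div, Int.toNat_natCast]
    · omega
  rw [hN, ← pvEnc6_aux _ s rfl]
  apply List.map_congr_left
  intro k hk
  rw [show ((0:Int) + 6 * (k:Int)) = ((6*k : Nat) : Int) from by push_cast; ring]
  rw [show (((6*k : Nat) : Int) + 6) = ((6*k : Nat) : Int) + ((6:Nat) : Int) from by norm_num]
  rw [PySem.List.slice_natCast_add]

theorem pvRunSmall : ∀ (c : List Int) (g0 : List Char) (acc cnt : Int), 0 ≤ cnt →
    cnt + (c.length : Int) < 6 →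
    c.foldl pvStepB (g0, acc, cnt) = (g0, c.foldl (fun a e => a * 2 + e) acc, cnt + (c.length : Int)) := by
  intro c
  induction c with
  | nil => intro g0 acc cnt _ _; simp
  | cons e c ih =>
    intro g0 acc cnt h0 hlt
    simp only [List.foldl_cons]
    rw [show pvStepB (g0, acc, cnt) e = (g0, acc * 2 + e, cnt + 1) from by
      simp only [pvStepB]; rw [if_neg (by simp at hlt; omega)]]
    rw [ih g0 (acc * 2 + e) (cnt + 1) (by omega) (by simp at hlt ⊢; omega)]
    simp; ring

theorem pvRunChunk : ∀ (c : List Int) (g0 : List Char) (acc cnt : Int), 0 ≤ cnt →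
    cnt + (c.length : Int) = 6 → c ≠ [] →
    c.foldl pvStepB (g0, acc, cnt) = (g0 ++ [pvChr63 (c.foldl (fun a e => a * 2 + e) acc)], 0, 0) := by
  intro c
  induction c with
  | nil => intro _ _ _ _ _ hne; exact absurd rfl hne
  | cons e c ih =>
    intro g0 acc cnt h0 heq _
    simp only [List.foldl_cons]
    cases c with
    | nil =>
      have h6 : cnt + 1 = 6 := by simp at heq; omega
      simp only [pvStepB]
      rw [if_pos h6]
      simp
    | cons e' c' =>
      rw [show pvStepB (g0, acc, cnt) e = (g0, acc * 2 + e, cnt + 1) from by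
        simp only [pvStepB]; rw [if_neg (by simp at heq; omega)]]
      rw [ih g0 (acc * 2 + e) (cnt + 1) (by omega) (by simp at heq ⊢; omega) (by simp)]

theorem pvParseBits : ∀ (c : List Int), pvIsBits c → ∀ a : Int,
    (c.map pvBitChar).foldl (fun a ch => 2 * a + (if ch = '1' then 1 else 0)) a
      = c.foldl (fun x e => x * 2 + e) a := by
  intro c
  induction c with
  | nil => intro _ _; simp
  | cons e c ih =>
    intro hb a
    simp only [List.map_cons, List.foldl_cons]
    rw [ih (fun x hx => hb x (List.mem_cons_of_mem _ hx))]
    rcases hb e List.mem_cons_self with h | h <;> subst h <;>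
      simp [pvBitChar, show ('0':Char) ≠ '1' from by decide] <;> ring_nf

theorem pvParseZeros : ∀ (p : Nat) (a : Int),
    (List.replicate p '0').foldl (fun a ch => 2 * a + (if ch = '1' then 1 else 0)) a = a * 2 ^ p := by
  intro p
  induction p with
  | zero => intro a; simp
  | succ p ih =>
    intro a
    rw [List.replicate_succ, List.foldl_cons, ih]
    rw [if_neg (by decide : ¬ ('0':Char) = '1')]
    ring

theorem pvParsePadded (c : List Int) (hb : pvIsBits c) (p : Nat) :
    pvParseBin2 (c.map pvBitChar ++ List.replicate p '0')
      = (c.foldl (fun a e => a * 2 + e) 0) * 2 ^ p := by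
  unfold pvParseBin2
  rw [List.foldl_append, pvParseBits c hb, pvParseZeros]

theorem pvMachineAux : ∀ (N : Nat) (bs : List Int), bs.length ≤ N → pvIsBits bs → ∀ g0 : List Char,
    pvFin (bs.foldl pvStepB (g0, 0, 0)) = g0 ++ pvEnc6 (pvPad6 (bs.map pvBitChar)) := by
  intro N
  induction N with
  | zero =>
    intro bs hlen _ g0
    have : bs = [] := List.eq_nil_of_length_eq_zero (by omega)
    subst this
    rw [pvPad6_eq]
    simp [pvFin, pvEnc6]
  | succ N ih =>
    intro bs hlen hb g0
    by_cases h0 : bs.length = 0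
    · have : bs = [] := List.eq_nil_of_length_eq_zero h0
      subst this
      rw [pvPad6_eq]; simp [pvFin, pvEnc6]
    by_cases h6 : bs.length < 6
    · -- partial final chunk
      rw [pvRunSmall bs g0 0 0 le_rfl (by omega)]
      rw [pvPad6_eq]
      have hlen' : (bs.map pvBitChar).length = bs.length := List.length_map ..
      rw [hlen']
      have hm : (6 - bs.length % 6) % 6 = 6 - bs.length := by omega
      rw [hm]
      have hfull : (bs.map pvBitChar ++ List.replicate (6 - bs.length) '0').length = 6 := by
        simp; omega
      rw [pvEnc6, if_neg (by
        simp only [List.isEmpty_iff]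
        intro hx
        rw [hx] at hfull
        simp at hfull)]
      rw [List.take_of_length_le (le_of_eq hfull), pvEnc6, if_pos (by
        rw [List.isEmpty_iff, List.drop_eq_nil_iff, hfull])]
      rw [pvParsePadded bs hb]
      simp only [pvFin]
      rw [if_pos (by show ¬((0:Int) + (bs.length : Int)) = 0; omega)]
      rw [show (6 - ((0:Int) + (bs.length : Int))).toNat = 6 - bs.length from by omega]
    · -- a full chunk followed by the rest
      rw [not_lt] at h6
      have hsplit := List.take_append_drop 6 bs
      have hb1 : pvIsBits (bs.take 6) := fun e he => hb e (List.mem_of_mem_take he)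
      have hb2 : pvIsBits (bs.drop 6) := fun e he => hb e (List.mem_of_mem_drop he)
      conv_lhs => rw [← hsplit]
      rw [List.foldl_append]
      have ht6 : (bs.take 6).length = 6 := by rw [List.length_take]; omega
      have hc1 : (0:Int) + ((bs.take 6).length : Int) = 6 := by rw [ht6]; norm_num
      have hc2 : bs.take 6 ≠ [] := by
        intro hx
        rw [hx] at ht6
        simp at ht6
      rw [pvRunChunk (bs.take 6) g0 0 0 le_rfl hc1 hc2]
      have hlen2 : (bs.drop 6).length ≤ N := by rw [List.length_drop]; omega
      rw [ih (bs.drop 6) hlen2 hb2]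
      have hparse : pvParseBin2 ((bs.take 6).map pvBitChar)
          = (bs.take 6).foldl (fun a e => a * 2 + e) 0 := by
        have := pvParsePadded (bs.take 6) hb1 0
        simpa using this
      have hR : pvEnc6 (pvPad6 (bs.map pvBitChar))
          = pvChr63 (pvParseBin2 ((bs.take 6).map pvBitChar))
            :: pvEnc6 (pvPad6 ((bs.drop 6).map pvBitChar)) := by
        conv_lhs => rw [pvPad6_eq]
        rw [pvEnc6, if_neg (by
          simp only [List.isEmpty_iff]
          intro hx
          have := congrArg List.length hx
          simp only [List.length_append, List.length_map, List.length_replicate, List.length_nil] at this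
          omega)]
        congr 2
        · rw [List.take_append_of_le_length (by rw [List.length_map]; omega), ← List.map_take]
        · rw [List.drop_append_of_le_length (by rw [List.length_map]; omega), ← List.map_drop]
          rw [pvPad6_eq ((bs.drop 6).map pvBitChar)]
          congr 2
          rw [List.length_map, List.length_map, List.length_drop]
          omega
      rw [hR, hparse]
      simp

theorem pvA_bits (m : List (List Int)) :
    (PySem.List.pyRange 1 (m.length : Int) 1).foldl (fun bits i =>
      (PySem.List.pyRange 0 i 1).foldl (fun bits j =>
        bits ++ [PySem.Int.toStr (PySem.List.pyGetD (PySem.List.pyGetD m i []) j 0)]) bits) ([] : List String)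
    = (pvBits m).map PySem.Int.toStr := by
  have h1 : (PySem.List.pyRange 1 (m.length : Int) 1).foldl (fun bits i =>
      (PySem.List.pyRange 0 i 1).foldl (fun bits j =>
        bits ++ [PySem.Int.toStr (PySem.List.pyGetD (PySem.List.pyGetD m i []) j 0)]) bits) ([] : List String)
      = (PySem.List.pyRange 1 (m.length : Int) 1).foldl (fun bits i =>
        bits ++ (PySem.List.pyRange 0 i 1).map
          (fun j => PySem.Int.toStr (PySem.List.pyGetD (PySem.List.pyGetD m i []) j 0))) ([] : List String) := by
    apply PySem.List.foldl_congr_mem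
    intro acc i _
    rw [PySem.List.foldl_append_singleton_eq_map]
  rw [h1, PySem.List.foldl_append_eq_flatMap]
  unfold pvBits
  rw [List.map_flatMap]
  simp only [List.map_map, List.nil_append]
  rfl

theorem pvJoin (bs : List Int) (hb : pvIsBits bs) :
    (PySem.Str.join "" (bs.map PySem.Int.toStr)).toList = bs.map pvBitChar := by
  rw [PySem.Str.toList_join]
  have h : (bs.map PySem.Int.toStr).map String.toList = (bs.map pvBitChar).map (fun c => [c]) := by
    rw [List.map_map, List.map_map]
    apply List.map_congr_left
    intro e he
    rcases hb e he with h | h <;> subst h <;> decide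
  rw [h]
  exact PySem.Chars.join_nil_singletons _

theorem pvNestedFoldl {σ : Type} (f : σ → Int → σ) (g : Int → List Int) :
    ∀ (l : List Int) (init : σ),
    l.foldl (fun st i => (g i).foldl f st) init = (l.flatMap g).foldl f init := by
  intro l
  induction l with
  | nil => intro init; rfl
  | cons a l ih => intro init; rw [List.foldl_cons, List.flatMap_cons, List.foldl_append, ih]

theorem pvB_fold (m : List (List Int)) (st0 : List Char × Int × Int) :
    (PySem.List.pyRange 1 (m.length : Int) 1).foldl (fun st i =>
      (PySem.List.pyRange 0 i 1).foldl (fun st j =>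
        let acc := st.2.1 * 2 + PySem.List.pyGetD (PySem.List.pyGetD m i []) j 0
        let cnt := st.2.2 + 1
        if cnt = 6 then (st.1 ++ [pvChr63 acc], (0 : Int), (0 : Int))
        else (st.1, acc, cnt)) st) st0
    = (pvBits m).foldl pvStepB st0 := by
  show (PySem.List.pyRange 1 (m.length : Int) 1).foldl (fun st i =>
      (PySem.List.pyRange 0 i 1).foldl (fun st j => pvStepB st (pvEntry m i j)) st) st0 = _
  unfold pvBits
  rw [← pvNestedFoldl]
  apply PySem.List.foldl_congr_mem
  intro acc i _
  rw [List.foldl_map]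

theorem pvPreBits (m : List (List Int)) (hpre : Pre_convert_to_graph6 m) : pvIsBits (pvBits m) := by
  intro e he
  unfold pvBits at he
  rw [List.mem_flatMap] at he
  obtain ⟨i, hi, he⟩ := he
  rw [List.mem_map] at he
  obtain ⟨j, hj, rfl⟩ := he
  rw [PySem.List.mem_pyRange_one] at hi hj
  unfold pvEntry
  rw [PySem.List.pyGetD_of_nonneg _ _ hj.1, PySem.List.pyGetD_of_nonneg _ _ (by omega : (0:Int) ≤ i)]
  have hi' : i.toNat < m.length := by omega
  exact (hpre i.toNat hi').2 j.toNat (by omega)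

-- ===== VERDICT (by name: the statement is the Claim_ definition above) =====
theorem convert_to_graph6_spec : Claim_equal_convert_to_graph6 := by
  intro matrix _ hpre
  unfold Spec_convert_to_graph6
  have hb : pvIsBits (pvBits matrix) := pvPreBits matrix hpre
  have hB : convert_to_graph6_alt matrix
      = String.ofList (pvFin ((pvBits matrix).foldl pvStepB
          ([pvChr63 (matrix.length : Int)], 0, 0))) := by
    simp only [convert_to_graph6_alt]
    rw [pvB_fold]
    by_cases hc : ((pvBits matrix).foldl pvStepB ([pvChr63 (matrix.length : Int)], 0, 0)).2.2 = 0 <;>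
      simp [pvFin, hc]
  have hA : convert_to_graph6 matrix
      = String.ofList ([pvChr63 (matrix.length : Int)]
          ++ pvEnc6 (pvPad6 ((pvBits matrix).map pvBitChar))) := by
    simp only [convert_to_graph6]
    rw [pvA_bits, pvJoin _ hb, pvChunkFold]
  rw [hA, hB, pvMachineAux ((pvBits matrix).length) (pvBits matrix) le_rfl hb]
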